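-- pv_equiv track=rewrite | github.com/pabloschwarzenberg/grader | tema11_ej2/tema11_ej2_6e5f90b8fc9d1ebe0d870e237e9591ee.py | validar_expresion
-- ===== SOURCE A (Python) =====
-- def validar_expresion(e):
--
--     verdad=0
--     if e[0].isalnum()== False:
--         verdad+=1
--     if e[-1].isalnum()== False:
--         verdad+=1
--     for i in range (1,len(e)-1):
--         if e[i].isalnum()== False and e[i+1].isalnum()== False :
--             verdad+=1
--
--
--     if verdad==0:
--         return True
--     elif verdad!=0:
--         return False
-- ===== SOURCE B (Python) =====
-- def validar_expresion(e):
--     bad = [i for i, c in enumerate(e) if not c.isalnum()]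
--     if not bad:
--         return True
--     return (bad[0] != 0 and bad[-1] != len(e) - 1
--             and all(b - a != 1 for a, b in zip(bad, bad[1:])))
-- ===== Notes on version B (the rewrite author's own statement) =====
-- stated objective: simpler
-- what changed: B builds the sorted list of non-alphanumeric indices once and decides validity from that list (endpoints clean, no two consecutive bad indices) instead of A's counter over separate endpoint checks and an index-pair loop.
import Mathlib
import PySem

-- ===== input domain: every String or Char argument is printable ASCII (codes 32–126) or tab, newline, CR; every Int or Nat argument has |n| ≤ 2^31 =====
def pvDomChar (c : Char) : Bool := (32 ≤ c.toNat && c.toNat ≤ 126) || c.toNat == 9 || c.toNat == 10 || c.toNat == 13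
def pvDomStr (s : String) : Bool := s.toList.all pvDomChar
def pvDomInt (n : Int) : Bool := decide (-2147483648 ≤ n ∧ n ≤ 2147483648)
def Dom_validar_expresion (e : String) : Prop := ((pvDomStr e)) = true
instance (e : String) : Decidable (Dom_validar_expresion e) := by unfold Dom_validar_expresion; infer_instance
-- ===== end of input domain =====

-- B replaces A's endpoint checks plus index-pair loop with a single bad-index list scanned once: simpler decomposition, same results.

-- ===== PORT A =====
def validar_expresion (e : String) : Bool :=
  let cs := e.toList
  let verdad : Int := 0
  let verdad : Int :=
    if PySem.Chars.isalnum (PySem.List.pyGetD cs 0 ' ') = false then verdad + 1 else verdad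
  let verdad : Int :=
    if PySem.Chars.isalnum (PySem.List.pyGetD cs (-1) ' ') = false then verdad + 1 else verdad
  let verdad : Int :=
    (PySem.List.pyRange 1 (PySem.List.len cs - 1) 1).foldl
      (fun verdad i =>
        if PySem.Chars.isalnum (PySem.List.pyGetD cs i ' ') = false ∧
           PySem.Chars.isalnum (PySem.List.pyGetD cs (i + 1) ' ') = false
        then verdad + 1 else verdad) verdad
  if verdad = 0 then true else false

-- ===== PORT B =====
def validar_expresion_alt (e : String) : Bool :=
  let cs := e.toList
  let bad : List Int :=
    ((PySem.List.enumerate cs 0).filter (fun p => !PySem.Chars.isalnum p.2)).map (·.1)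
  match bad with
  | [] => true
  | b0 :: _ =>
      (b0 != 0) &&
      (PySem.List.pyGetD bad (-1) 0 != PySem.List.len cs - 1) &&
      ((bad.zip bad.tail).all (fun p => p.2 - p.1 != 1))

-- ===== PRECONDITION & SPEC =====
-- Pre_ excludes only the empty string, on which A raises IndexError (e[0]).
def Pre_validar_expresion (e : String) : Prop := e.toList ≠ []
instance (e : String) : Decidable (Pre_validar_expresion e) := by unfold Pre_validar_expresion; infer_instance
def pvWitness_validar_expresion : String := "a+b"

def Spec_validar_expresion (e : String) (out : Bool) : Prop := out = validar_expresion_alt e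
instance (e : String) (out : Bool) : Decidable (Spec_validar_expresion e out) := by unfold Spec_validar_expresion; infer_instance

-- ===== CLAIM (what is proved, stated in full; the proofs are below) =====
def Claim_equal_validar_expresion : Prop := ∀ (e : String), Dom_validar_expresion e → Pre_validar_expresion e → Spec_validar_expresion e (validar_expresion e)

-- ===== LEMMAS AND PROOFS =====

theorem A_true_iff (e : String) (hne : e.toList ≠ []) :
    validar_expresion e = true ↔
      (PySem.Chars.isalnum (e.toList.getD 0 ' ') = true ∧
       PySem.Chars.isalnum (e.toList.getD (e.toList.length - 1) ' ') = true ∧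
       ∀ k : Nat, 1 ≤ k → k + 1 < e.toList.length →
         ¬(PySem.Chars.isalnum (e.toList.getD k ' ') = false ∧
           PySem.Chars.isalnum (e.toList.getD (k + 1) ' ') = false)) := by
  unfold validar_expresion
  set cs := e.toList with hcs
  have hlen : 0 < cs.length := List.length_pos_iff.mpr hne
  simp only [PySem.List.foldl_ite_add_one]
  rw [PySem.List.pyGetD_neg_one cs ' ' hne, PySem.List.pyGetD_zero]
  have hlast : cs.getLast hne = cs.getD (cs.length - 1) ' ' := by
    rw [List.getLast_eq_getElem, List.getD_eq_getElem cs ' ' (by omega)]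
  rw [hlast]
  have cast1 : ∀ k : Nat, PySem.List.pyGetD cs ((k : Int) + 1) ' ' = cs.getD (k + 1) ' ' := by
    intro k
    rw [show ((k : Int) + 1) = ((k + 1 : Nat) : Int) by push_cast; ring, PySem.List.pyGetD_natCast]
  have hCnn : (0 : Int) ≤ ((PySem.List.pyRange 1 (PySem.List.len cs - 1) 1).countP
      (fun i => decide (PySem.Chars.isalnum (PySem.List.pyGetD cs i ' ') = false ∧
         PySem.Chars.isalnum (PySem.List.pyGetD cs (i + 1) ' ') = false)) : Int) :=
    Int.natCast_nonneg _
  have hmid : ((PySem.List.pyRange 1 (PySem.List.len cs - 1) 1).countP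
      (fun i => decide (PySem.Chars.isalnum (PySem.List.pyGetD cs i ' ') = false ∧
         PySem.Chars.isalnum (PySem.List.pyGetD cs (i + 1) ' ') = false)) = 0) ↔
      (∀ k : Nat, 1 ≤ k → k + 1 < cs.length →
         ¬(PySem.Chars.isalnum (cs.getD k ' ') = false ∧
           PySem.Chars.isalnum (cs.getD (k + 1) ' ') = false)) := by
    rw [List.countP_eq_zero]
    constructor
    · intro h k hk hk1
      have hm : ((k : Int)) ∈ PySem.List.pyRange 1 (PySem.List.len cs - 1) 1 := by
        rw [PySem.List.mem_pyRange_one]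
        simp only [PySem.List.len_eq]
        omega
      have hthis := h _ hm
      simp only [decide_eq_true_eq, cast1, PySem.List.pyGetD_natCast] at hthis
      exact hthis
    · intro h i hi
      rw [PySem.List.mem_pyRange_one] at hi
      simp only [PySem.List.len_eq] at hi
      have hik : i = ((i.toNat : Nat) : Int) := by omega
      rw [hik]
      simp only [decide_eq_true_eq, cast1, PySem.List.pyGetD_natCast]
      exact h i.toNat (by omega) (by omega)
  rw [show ∀ x : Int, ((if x = 0 then true else false) = true ↔ x = 0) from fun x => by
        split_ifs with h <;> simp [h]]
  rw [← hmid]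
  set C := (PySem.List.pyRange 1 (PySem.List.len cs - 1) 1).countP
      (fun i => decide (PySem.Chars.isalnum (PySem.List.pyGetD cs i ' ') = false ∧
         PySem.Chars.isalnum (PySem.List.pyGetD cs (i + 1) ' ') = false)) with hCdef
  by_cases h0 : PySem.Chars.isalnum (cs[0]?.getD ' ') = false <;>
    by_cases h1 : PySem.Chars.isalnum (cs[cs.length - 1]?.getD ' ') = false <;>
      simp [h0, h1] <;> omega


def badOf (cs : List Char) : List Int :=
  ((PySem.List.enumerate cs 0).filter (fun p => !PySem.Chars.isalnum p.2)).map (·.1)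

theorem mem_badOf (cs : List Char) (j : Int) :
    j ∈ badOf cs ↔ ∃ (k : Nat) (_ : k < cs.length), j = (k : Int) ∧ PySem.Chars.isalnum cs[k] = false := by
  simp only [badOf, List.mem_map, List.mem_filter, PySem.List.mem_enumerate_iff]
  constructor
  · rintro ⟨⟨i, c⟩, ⟨⟨k, hk, heq⟩, hal⟩, rfl⟩
    rw [Prod.mk.injEq] at heq
    obtain ⟨h1, h2⟩ := heq
    subst h2
    exact ⟨k, hk, by simp [h1], by simpa using hal⟩
  · rintro ⟨k, hk, rfl, hal⟩
    exact ⟨((k : Int), cs[k]), ⟨⟨k, hk, by simp⟩, by simpa using hal⟩, rfl⟩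

theorem badOf_sorted (cs : List Char) : (badOf cs).Pairwise (· < ·) :=
  List.Pairwise.map _ (fun _ _ h => h) ((PySem.List.pairwise_lt_enumerate cs 0).filter _)

theorem zip_adj (l : List Int) (hs : l.Pairwise (· < ·)) :
    ((l.zip l.tail).all (fun p => p.2 - p.1 != 1)) = true ↔ ∀ a ∈ l, a + 1 ∉ l := by
  induction l with
  | nil => simp
  | cons x t ih =>
    match t, hs with
    | [], _ => simp
    | y :: t2, hs =>
      rcases List.pairwise_cons.mp hs with ⟨hx, hs2⟩
      have hy : ∀ b ∈ t2, y < b := (List.pairwise_cons.mp hs2).1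
      simp only [List.tail_cons, List.zip_cons_cons, List.all_cons, Bool.and_eq_true] at *
      rw [ih hs2]
      constructor
      · rintro ⟨h1, h2⟩ a ha hmem
        have hxy : x < y := hx y (by simp)
        rcases List.mem_cons.mp ha with rfl | ha'
        · rcases List.mem_cons.mp hmem with h | h
          · omega
          · rcases List.mem_cons.mp h with h | h
            · simp at h1; omega
            · have := hy _ h; have := hx _ (List.mem_cons_of_mem y h); omega
        · rcases List.mem_cons.mp hmem with h | h
          · have := hx _ ha'; omega
          · exact h2 a ha' h
      · intro h
        refine ⟨?_, fun a ha hm => h a (List.mem_cons_of_mem x ha) (List.mem_cons_of_mem x hm)⟩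
        have := h x (by simp)
        simp only [bne_iff_ne, ne_eq]
        intro heq
        exact this (by rw [show x + 1 = y by omega]; simp)

theorem le_getLast_of_sorted (l : List Int) (hs : l.Pairwise (· < ·)) (hne : l ≠ []) :
    ∀ a ∈ l, a ≤ l.getLast hne := by
  induction l with
  | nil => simp
  | cons x t ih =>
    rcases List.pairwise_cons.mp hs with ⟨hx, hs2⟩
    intro a ha
    rcases List.mem_cons.mp ha with rfl | ha'
    · cases t with
      | nil => simp
      | cons y t2 =>
        rw [List.getLast_cons (by simp)]
        have := ih hs2 (by simp)
        have hm := List.getLast_mem (l := y :: t2) (by simp)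
        have := hx _ hm
        omega
    · have htne : t ≠ [] := by rintro rfl; simp at ha'
      rw [List.getLast_cons htne]
      exact ih hs2 htne a ha'

theorem B_true_iff (e : String) (hne : e.toList ≠ []) :
    validar_expresion_alt e = true ↔
      (PySem.Chars.isalnum (e.toList.getD 0 ' ') = true ∧
       PySem.Chars.isalnum (e.toList.getD (e.toList.length - 1) ' ') = true ∧
       ∀ k : Nat, 1 ≤ k → k + 1 < e.toList.length →
         ¬(PySem.Chars.isalnum (e.toList.getD k ' ') = false ∧
           PySem.Chars.isalnum (e.toList.getD (k + 1) ' ') = false)) := by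
  set cs := e.toList with hcs
  have hlen : 0 < cs.length := List.length_pos_iff.mpr hne
  have hget : ∀ (k : Nat) (hk : k < cs.length), cs.getD k ' ' = cs[k] := fun k hk =>
    List.getD_eq_getElem cs ' ' hk
  have hmem : ∀ (k : Nat) (hk : k < cs.length),
      ((k : Int) ∈ badOf cs ↔ PySem.Chars.isalnum (cs.getD k ' ') = false) := by
    intro k hk
    rw [mem_badOf, hget k hk]
    constructor
    · rintro ⟨k', hk', hkk', hal⟩
      have : k = k' := by omega
      subst this; exact hal
    · intro h; exact ⟨k, hk, rfl, h⟩
  have halt : validar_expresion_alt e =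
      (match badOf cs with
       | [] => true
       | b0 :: _ =>
          (b0 != 0) &&
          (PySem.List.pyGetD (badOf cs) (-1) 0 != PySem.List.len cs - 1) &&
          (((badOf cs).zip (badOf cs).tail).all (fun p => p.2 - p.1 != 1))) := rfl
  rw [halt]
  have hbound : ∀ a ∈ badOf cs, 0 ≤ a ∧ a < (cs.length : Int) := by
    intro a ha
    rw [mem_badOf] at ha
    obtain ⟨k, hk, rfl, _⟩ := ha
    omega
  have hsort0 := badOf_sorted cs
  cases hbad : badOf cs with
  | nil =>
    have hnone : ∀ (k : Nat) (hk : k < cs.length), PySem.Chars.isalnum (cs.getD k ' ') = true := by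
      intro k hk
      by_contra h
      simp only [Bool.not_eq_true] at h
      have := (hmem k hk).mpr h
      rw [hbad] at this
      simp at this
    simp only [true_iff]
    refine ⟨hnone 0 hlen, hnone _ (by omega), fun k hk hk1 h => by
      rw [hnone k (by omega)] at h; simp at h⟩
  | cons b0 rest =>
    have hbne : badOf cs ≠ [] := by rw [hbad]; simp
    have hlastle : ∀ a ∈ badOf cs, a ≤ (badOf cs).getLast hbne :=
      le_getLast_of_sorted _ hsort0 hbne
    have hlastmem : (badOf cs).getLast hbne ∈ badOf cs := List.getLast_mem hbne
    have hb0mem : b0 ∈ badOf cs := by rw [hbad]; simp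
    have hb0le : ∀ a ∈ badOf cs, b0 ≤ a := by
      have hsortc : (b0 :: rest).Pairwise (· < ·) := hbad ▸ hsort0
      intro a ha
      rw [hbad] at ha
      rcases List.mem_cons.mp ha with rfl | ha'
      · omega
      · have := (List.pairwise_cons.mp hsortc).1 a ha'; omega
    simp only [Bool.and_eq_true, bne_iff_ne, ne_eq]
    rw [← hbad, PySem.List.pyGetD_neg_one (badOf cs) 0 hbne]
    have c1 : (¬ b0 = 0) ↔ PySem.Chars.isalnum (cs.getD 0 ' ') = true := by
      constructor
      · intro h
        by_contra h0
        simp only [Bool.not_eq_true] at h0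
        have hm := (hmem 0 hlen).mpr h0
        have h1 := hb0le _ hm
        have h2 := hbound b0 hb0mem
        simp only [Nat.cast_zero] at h1
        omega
      · intro h h0
        subst h0
        have := (hmem 0 hlen).mp (by simpa using hb0mem)
        rw [h] at this; cases this
    have c2 : (¬ (badOf cs).getLast hbne = PySem.List.len cs - 1) ↔
        PySem.Chars.isalnum (cs.getD (cs.length - 1) ' ') = true := by
      simp only [PySem.List.len_eq]
      constructor
      · intro h
        by_contra h0
        simp only [Bool.not_eq_true] at h0
        have hm := (hmem (cs.length - 1) (by omega)).mpr h0
        have h1 := hlastle _ hm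
        have h2 := hbound _ hlastmem
        have h3 : ((cs.length - 1 : Nat) : Int) = (cs.length : Int) - 1 := by omega
        omega
      · intro h h0
        have hm : (badOf cs).getLast hbne ∈ badOf cs := hlastmem
        rw [mem_badOf] at hm
        obtain ⟨k, hk, hkeq, hal⟩ := hm
        have hke : k = cs.length - 1 := by omega
        subst hke
        rw [← hget _ hk] at hal
        rw [hal] at h; cases h
    have c3 : (((badOf cs).zip (badOf cs).tail).all (fun p => p.2 - p.1 != 1)) = true ↔
        (∀ k : Nat, k + 1 < cs.length →
          ¬(PySem.Chars.isalnum (cs.getD k ' ') = false ∧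
            PySem.Chars.isalnum (cs.getD (k + 1) ' ') = false)) := by
      rw [zip_adj _ hsort0]
      constructor
      · rintro h k hk1 ⟨ha, hb⟩
        have h1 := (hmem k (by omega)).mpr ha
        have h2 := (hmem (k + 1) hk1).mpr hb
        have hcast : ((k : Int)) + 1 = ((k + 1 : Nat) : Int) := by push_cast; ring
        exact h _ h1 (hcast ▸ h2)
      · intro h a ha hm
        obtain ⟨k, hk, rfl, hal⟩ := (mem_badOf cs a).mp ha
        rw [show ((k : Int)) + 1 = ((k + 1 : Nat) : Int) by push_cast; ring] at hm
        have hk1 : k + 1 < cs.length := by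
          have := hbound _ hm; omega
        have hb := (hmem (k + 1) hk1).mp hm
        exact h k hk1 ⟨by rw [hget k hk]; exact hal, hb⟩
    rw [c1, c2, c3, and_assoc]
    constructor
    · rintro ⟨h0, hl, hall⟩
      exact ⟨h0, hl, fun k _ hk1 => hall k hk1⟩
    · rintro ⟨h0, hl, h1⟩
      refine ⟨h0, hl, fun k hk1 => ?_⟩
      cases Nat.eq_zero_or_pos k with
      | inl hz =>
        subst hz
        rintro ⟨ha, _⟩
        rw [h0] at ha; cases ha
      | inr hpos => exact h1 k hpos hk1

theorem main_lemma (e : String) (hne : e.toList ≠ []) :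
    validar_expresion e = validar_expresion_alt e :=
  Bool.eq_iff_iff.mpr ((A_true_iff e hne).trans (B_true_iff e hne).symm)

-- ===== VERDICT (by name: the statement is the Claim_ definition above) =====
theorem validar_expresion_spec : Claim_equal_validar_expresion := by
  intro e _ hpre
  exact main_lemma e hpre
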